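-- pv_equiv track=rewrite | github.com/sakagami0615/UtilityApi | Python/parsename_morphology/dict_comparison.py | DictComparisonSelectKey
-- ===== SOURCE A (Python) =====
-- def DictComparisonSelectKey(dict_1, dict_2, wanted_keys):
--
-- 	dictfilter = lambda x, y: dict([ (i,x[i]) for i in x if i in set(y) ])
--
-- 	dictfilter_1 = dictfilter(dict_1, wanted_keys)
-- 	dictfilter_2 = dictfilter(dict_2, wanted_keys)
--
-- 	if dictfilter_1 == dictfilter_2:
-- 		comp_ret = True
-- 	else:
-- 		comp_ret = False
--
-- 	return comp_ret
-- ===== SOURCE B (Python) =====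
-- def DictComparisonSelectKey(dict_1, dict_2, wanted_keys):
--     for k in wanted_keys:
--         in1 = k in dict_1
--         if in1 != (k in dict_2):
--             return False
--         if in1 and dict_1[k] != dict_2[k]:
--             return False
--     return True
-- ===== Notes on version B (the rewrite author's own statement) =====
-- stated objective: faster
-- what changed: Replaces building two filtered dicts (A rebuilds set(wanted_keys) for every key of each dict) and comparing them with one short-circuiting pass over wanted_keys that checks presence and value of each key directly via O(1) dict lookups.
import Mathlib
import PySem

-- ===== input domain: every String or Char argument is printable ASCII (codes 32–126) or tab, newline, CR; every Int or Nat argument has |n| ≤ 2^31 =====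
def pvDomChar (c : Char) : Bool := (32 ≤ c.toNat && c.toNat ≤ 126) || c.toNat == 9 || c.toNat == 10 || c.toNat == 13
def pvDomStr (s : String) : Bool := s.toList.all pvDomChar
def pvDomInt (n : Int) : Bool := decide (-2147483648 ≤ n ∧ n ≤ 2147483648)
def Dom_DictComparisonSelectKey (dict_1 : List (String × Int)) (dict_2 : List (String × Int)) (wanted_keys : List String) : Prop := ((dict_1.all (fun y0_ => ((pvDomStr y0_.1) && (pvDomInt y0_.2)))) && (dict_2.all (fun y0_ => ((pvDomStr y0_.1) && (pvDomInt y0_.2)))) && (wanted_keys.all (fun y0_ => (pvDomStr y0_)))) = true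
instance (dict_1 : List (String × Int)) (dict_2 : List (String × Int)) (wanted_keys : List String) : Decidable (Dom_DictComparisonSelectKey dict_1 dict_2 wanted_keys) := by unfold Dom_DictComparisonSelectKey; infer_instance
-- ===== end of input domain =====

-- B replaces A's two filtered intermediate dicts and order-insensitive dict comparison by one short-circuiting pass over wanted_keys (asymptotically faster: A rebuilds set(wanted_keys) per key; measured faster in a timing run).


-- ===== PORT A =====
-- Python's `==` on two dicts ignores insertion order: same key set, same value at each key.
def pvPyDictEq (f1 f2 : PySem.Dict String Int) : Bool :=
  f1.size == f2.size && f1.items.all (fun p => f2.get? p.1 == some p.2)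

-- dictfilter x y = dict([(i, x[i]) for i in x if i in set(y)])
def pvDictfilter (x : PySem.Dict String Int) (y : List String) : PySem.Dict String Int :=
  PySem.Dict.ofList (x.items.filter (fun p => (PySem.Set.ofList y).contains p.1))

def DictComparisonSelectKey (dict_1 : List (String × Int)) (dict_2 : List (String × Int)) (wanted_keys : List String) : Bool :=
  let dictfilter_1 := pvDictfilter (PySem.Dict.ofList dict_1) wanted_keys
  let dictfilter_2 := pvDictfilter (PySem.Dict.ofList dict_2) wanted_keys
  if pvPyDictEq dictfilter_1 dictfilter_2 then true else false

-- ===== PORT B =====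
def pvCompareLoop (d1 d2 : PySem.Dict String Int) : List String → Bool
  | [] => true
  | k :: rest =>
      let in1 := d1.contains k
      if in1 != d2.contains k then false
      else if in1 && !(d1.getD k 0 == d2.getD k 0) then false
      else pvCompareLoop d1 d2 rest

def DictComparisonSelectKey_alt (dict_1 : List (String × Int)) (dict_2 : List (String × Int)) (wanted_keys : List String) : Bool :=
  pvCompareLoop (PySem.Dict.ofList dict_1) (PySem.Dict.ofList dict_2) wanted_keys

-- ===== PRECONDITION & SPEC =====
def Spec_DictComparisonSelectKey (dict_1 : List (String × Int)) (dict_2 : List (String × Int)) (wanted_keys : List String) (out : Bool) : Prop := out = DictComparisonSelectKey_alt dict_1 dict_2 wanted_keys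
instance (dict_1 : List (String × Int)) (dict_2 : List (String × Int)) (wanted_keys : List String) (out : Bool) : Decidable (Spec_DictComparisonSelectKey dict_1 dict_2 wanted_keys out) := by unfold Spec_DictComparisonSelectKey; infer_instance

-- ===== CLAIM (what is proved, stated in full; the proofs are below) =====
def Claim_equal_DictComparisonSelectKey : Prop := ∀ (dict_1 : List (String × Int)) (dict_2 : List (String × Int)) (wanted_keys : List String), Dom_DictComparisonSelectKey dict_1 dict_2 wanted_keys → Spec_DictComparisonSelectKey dict_1 dict_2 wanted_keys (DictComparisonSelectKey dict_1 dict_2 wanted_keys)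

-- ===== LEMMAS AND PROOFS =====

-- The filtered dict's item list is literally the filtered item list (fresh distinct keys).
theorem pvDictfilter_items (x : PySem.Dict String Int) (y : List String) (hx : x.keys.Nodup) :
    (pvDictfilter x y).items = x.items.filter (fun p => (PySem.Set.ofList y).contains p.1) := by
  have hsub : ((x.items.filter (fun p => (PySem.Set.ofList y).contains p.1)).map Prod.fst).Nodup := by
    have h1 : List.Sublist ((x.items.filter (fun p => (PySem.Set.ofList y).contains p.1)).map Prod.fst)
        (x.items.map Prod.fst) := (List.filter_sublist).map _
    exact h1.nodup (by simpa [PySem.Dict.keys] using hx)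
  have h := PySem.Dict.items_foldl_insert_fresh
      (x.items.filter (fun p => (PySem.Set.ofList y).contains p.1))
      Prod.fst Prod.snd PySem.Dict.empty
      (by intro a _; simp [PySem.Dict.contains_empty]) hsub
  simpa [pvDictfilter, PySem.Dict.ofList, PySem.Dict.update] using h

-- Lookup in the filtered dict.
theorem pvDictfilter_get? (x : PySem.Dict String Int) (y : List String) (hx : x.keys.Nodup) (k : String) :
    (pvDictfilter x y).get? k = if k ∈ y then x.get? k else none := by
  have hnf : (pvDictfilter x y).keys.Nodup := PySem.Dict.nodup_keys_ofList _
  have hitems := pvDictfilter_items x y hx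
  have hkeys : (pvDictfilter x y).keys
      = (x.items.filter (fun p => (PySem.Set.ofList y).contains p.1)).map Prod.fst := by
    simp [PySem.Dict.keys, hitems]
  have hcont : ∀ s : String, (PySem.Set.ofList y).contains s = true ↔ s ∈ y := by
    intro s
    simp
  by_cases hky : k ∈ y
  · simp only [hky, if_pos]
    cases hget : x.get? k with
    | some v =>
        have hmem : (k, v) ∈ x.items := PySem.Dict.mem_items_of_get?_eq_some _ hget
        have : (k, v) ∈ (pvDictfilter x y).items := by
          rw [hitems]; exact List.mem_filter.mpr ⟨hmem, by simpa using (hcont k).mpr hky⟩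
        exact PySem.Dict.get?_of_mem_items _ this hnf
    | none =>
        have hnk : k ∉ x.keys := (PySem.Dict.get?_eq_none_iff_not_mem_keys _ _).mp hget
        apply (PySem.Dict.get?_eq_none_iff_not_mem_keys _ _).mpr
        rw [hkeys]
        intro hk
        rcases List.mem_map.mp hk with ⟨p, hp, rfl⟩
        exact hnk (by
          simp only [PySem.Dict.keys, List.mem_map]
          exact ⟨p, (List.mem_filter.mp hp).1, rfl⟩)
  · simp only [hky, if_false]
    apply (PySem.Dict.get?_eq_none_iff_not_mem_keys _ _).mpr
    rw [hkeys]
    intro hk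
    rcases List.mem_map.mp hk with ⟨p, hp, rfl⟩
    exact hky ((hcont p.1).mp (by simpa using (List.mem_filter.mp hp).2))

theorem pv_keys_length (f : PySem.Dict String Int) : f.keys.length = f.size := by
  simp [PySem.Dict.keys, PySem.Dict.size]

-- Python dict equality ↔ pointwise lookup equality (for nodup-keyed dicts).
theorem pvPyDictEq_iff (f1 f2 : PySem.Dict String Int) (h1 : f1.keys.Nodup) (h2 : f2.keys.Nodup) :
    pvPyDictEq f1 f2 = true ↔ ∀ k, f1.get? k = f2.get? k := by
  constructor
  · intro h k
    simp only [pvPyDictEq, Bool.and_eq_true, beq_iff_eq, List.all_eq_true] at h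
    obtain ⟨hsz, hall'⟩ := h
    have hall : ∀ p ∈ f1.items, f2.get? p.1 = some p.2 := by
      intro p hp; simpa using hall' p hp
    have hsub : f1.keys ⊆ f2.keys := by
      intro k' hk'
      obtain ⟨v, hv⟩ : ∃ v, (k', v) ∈ f1.items := by
        simpa [PySem.Dict.keys] using hk'
      have := hall (k', v) hv
      by_contra hmem
      rw [(PySem.Dict.get?_eq_none_iff_not_mem_keys _ _).mpr hmem] at this
      simp at this
    have hperm : f1.keys.Perm f2.keys := by
      refine (h1.subperm hsub).perm_of_length_le ?_
      rw [pv_keys_length, pv_keys_length, hsz]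
    cases hget : f1.get? k with
    | some v =>
      exact (hall (k, v) (PySem.Dict.mem_items_of_get?_eq_some _ hget)).symm
    | none =>
      symm
      apply (PySem.Dict.get?_eq_none_iff_not_mem_keys _ _).mpr
      intro hk
      exact ((PySem.Dict.get?_eq_none_iff_not_mem_keys _ _).mp hget) (hperm.mem_iff.mpr hk)
  · intro h
    have hsub1 : f1.keys ⊆ f2.keys := by
      intro k hk
      by_contra hmem
      have := (PySem.Dict.get?_eq_none_iff_not_mem_keys _ _).mpr hmem
      rw [← h k] at this
      exact ((PySem.Dict.get?_eq_none_iff_not_mem_keys _ _).mp this) hk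
    have hsub2 : f2.keys ⊆ f1.keys := by
      intro k hk
      by_contra hmem
      have := (PySem.Dict.get?_eq_none_iff_not_mem_keys _ _).mpr hmem
      rw [h k] at this
      exact ((PySem.Dict.get?_eq_none_iff_not_mem_keys _ _).mp this) hk
    have hperm : f1.keys.Perm f2.keys := (h1.subperm hsub1).antisymm (h2.subperm hsub2)
    simp only [pvPyDictEq, Bool.and_eq_true, beq_iff_eq, List.all_eq_true]
    constructor
    · rw [← pv_keys_length, ← pv_keys_length]
      exact hperm.length_eq
    · intro p hp
      have : f1.get? p.1 = some p.2 := PySem.Dict.get?_of_mem_items _ hp h1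
      rw [h p.1] at this
      simpa using this

-- B's loop ↔ pointwise lookup equality on wanted keys.
theorem pvCompareLoop_iff (d1 d2 : PySem.Dict String Int) (w : List String) :
    pvCompareLoop d1 d2 w = true ↔ ∀ k ∈ w, d1.get? k = d2.get? k := by
  induction w with
  | nil => simp [pvCompareLoop]
  | cons k rest ih =>
    simp only [pvCompareLoop, List.mem_cons]
    rw [PySem.Dict.contains_eq_isSome_get? d1 k, PySem.Dict.contains_eq_isSome_get? d2 k]
    cases hg1 : d1.get? k with
    | none =>
      cases hg2 : d2.get? k with
      | none =>
        simp only [Option.isSome_none]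
        simpa [ih] using
          (by
            constructor
            · rintro h k' (rfl | hk')
              · rw [hg1, hg2]
              · exact h k' hk'
            · intro h k' hk'; exact h k' (Or.inr hk')
            : (∀ k' ∈ rest, d1.get? k' = d2.get? k') ↔ ∀ k' , k' = k ∨ k' ∈ rest → d1.get? k' = d2.get? k')
      | some v2 => simp [hg1, hg2]
    | some v1 =>
      cases hg2 : d2.get? k with
      | none => simp [hg1, hg2]
      | some v2 =>
        rw [show d1.getD k 0 = v1 from by rw [PySem.Dict.getD_eq_get?_getD, hg1]; rfl,
           show d2.getD k 0 = v2 from by rw [PySem.Dict.getD_eq_get?_getD, hg2]; rfl]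
        by_cases hv : v1 = v2
        · subst hv
          simp only [Option.isSome_some, bne_self_eq_false, beq_self_eq_true, Bool.not_true,
            Bool.and_false]
          constructor
          · intro h
            rintro k' (rfl | hk')
            · rw [hg1, hg2]
            · exact (ih.mp (by simpa using h)) k' hk'
          · intro h
            simp only [Bool.false_eq_true, if_false]
            exact ih.mpr (fun k' hk' => h k' (Or.inr hk'))
        · simp only [Option.isSome_some]
          constructor
          · intro h
            exfalso
            simp [hv] at h
          · intro h
            exfalso
            have := h k (Or.inl rfl)
            rw [hg1, hg2] at this
            exact hv (by injection this)

-- ===== VERDICT (by name: the statement is the Claim_ definition above) =====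
theorem DictComparisonSelectKey_spec : Claim_equal_DictComparisonSelectKey := by
  intro dict_1 dict_2 wanted_keys _
  unfold Spec_DictComparisonSelectKey DictComparisonSelectKey DictComparisonSelectKey_alt
  have hb : ∀ b : Bool, (if b = true then true else false) = b := by decide
  simp only []
  rw [hb, Bool.eq_iff_iff]
  have hn1 : (pvDictfilter (PySem.Dict.ofList dict_1) wanted_keys).keys.Nodup :=
    PySem.Dict.nodup_keys_ofList _
  have hn2 : (pvDictfilter (PySem.Dict.ofList dict_2) wanted_keys).keys.Nodup :=
    PySem.Dict.nodup_keys_ofList _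
  rw [pvPyDictEq_iff _ _ hn1 hn2, pvCompareLoop_iff]
  constructor
  · intro h k hk
    have := h k
    rw [pvDictfilter_get? _ _ (PySem.Dict.nodup_keys_ofList _),
        pvDictfilter_get? _ _ (PySem.Dict.nodup_keys_ofList _)] at this
    simpa [hk] using this
  · intro h k
    rw [pvDictfilter_get? _ _ (PySem.Dict.nodup_keys_ofList _),
        pvDictfilter_get? _ _ (PySem.Dict.nodup_keys_ofList _)]
    by_cases hk : k ∈ wanted_keys
    · simpa [hk] using h k hk
    · simp [hk]
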